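-- pv_equiv track=rewrite | github.com/NiushanDong/data_processing | utils/py3/util.py | lists_non_shared
-- ===== SOURCE A (Python) =====
-- def two_list_intersection(list1, list2):
--     if list1 is None or list2 is None:
--         return None
--
--     ret = []
--     for one in list1:
--         if one in list2:
--             ret.append(one)
--
--     return ret
--
-- def lists_intersection(all_lists):
--     if all_lists is None:
--         return None
--
--     ret = all_lists[0]
--     for i in range(1, len(all_lists)):
--         ret = two_list_intersection(ret, all_lists[i])
--
--     return ret
--
-- def lists_non_shared(all_lists):
--     if all_lists is None:
--         return None
--
--     common = lists_intersection(all_lists)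
--     ret = []
--     for one_list in all_lists:
--         for data in one_list:
--             if not data in common:
--                 ret.append(data)
--
--     return ret
-- ===== SOURCE B (Python) =====
-- def lists_non_shared(all_lists):
--     if all_lists is None:
--         return None
--     n = len(all_lists)
--     candidates = set(all_lists[0])
--     count = dict.fromkeys(candidates, 0)
--     for one_list in all_lists:
--         s = set(one_list)
--         for x in candidates:
--             if x in s:
--                 count[x] += 1
--     common = {x for x in candidates if count[x] == n}
--     return [x for one_list in all_lists for x in one_list if x not in common]
-- ===== Notes on version B (the rewrite author's own statement) =====
-- stated objective: alternative
-- what changed: Replaces A's repeated pairwise list-intersections with a candidate set from the first list plus a dict that counts how many lists (taken as sets) contain each candidate, thresholding the count at n to get the common set before one comprehension emits the non-shared elements.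
import Mathlib
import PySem

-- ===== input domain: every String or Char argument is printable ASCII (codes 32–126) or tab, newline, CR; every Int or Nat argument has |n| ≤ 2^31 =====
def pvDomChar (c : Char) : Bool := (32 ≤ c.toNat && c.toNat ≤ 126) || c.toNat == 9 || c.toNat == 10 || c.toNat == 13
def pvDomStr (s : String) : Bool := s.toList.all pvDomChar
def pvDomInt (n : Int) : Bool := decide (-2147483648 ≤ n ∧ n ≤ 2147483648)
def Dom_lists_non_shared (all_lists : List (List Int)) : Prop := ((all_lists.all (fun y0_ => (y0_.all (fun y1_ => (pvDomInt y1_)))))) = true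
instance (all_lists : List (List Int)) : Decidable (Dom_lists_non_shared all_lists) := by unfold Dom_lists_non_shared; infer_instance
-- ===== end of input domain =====

-- B replaces A's repeated pairwise intersections by a candidate set plus one count table (alternative algorithm, same proved return value).

-- ===== PORT A =====
def two_list_intersection (list1 list2 : List Int) : List Int :=
  list1.foldl (fun ret one => if list2.contains one then ret ++ [one] else ret) []

def lists_intersection (all_lists : List (List Int)) : List Int :=
  (PySem.List.pyRange 1 all_lists.length 1).foldl
    (fun ret i => two_list_intersection ret (PySem.List.pyGetD all_lists i []))
    (PySem.List.pyGetD all_lists 0 [])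

def lists_non_shared (all_lists : List (List Int)) : List Int :=
  let common := lists_intersection all_lists
  all_lists.foldl (fun ret one_list =>
    one_list.foldl (fun ret data => if common.contains data then ret else ret ++ [data]) ret) []

-- ===== PORT B =====
def lists_non_shared_alt (all_lists : List (List Int)) : List Int :=
  let n : Int := all_lists.length
  let candidates : PySem.Set Int := PySem.Set.ofList (PySem.List.pyGetD all_lists 0 [])
  let count0 : PySem.Dict Int Int :=
    candidates.foldl (fun d x => d.insert x 0) PySem.Dict.empty
  let count : PySem.Dict Int Int :=
    all_lists.foldl (fun c one_list =>
      let s : PySem.Set Int := PySem.Set.ofList one_list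
      candidates.foldl (fun c x => if PySem.Set.contains s x then c.modify x 0 (· + 1) else c) c) count0
  let common : PySem.Set Int := candidates.filter (fun x => count.getD x 0 == n)
  all_lists.flatMap (fun one_list => one_list.filter (fun x => !(PySem.Set.contains common x)))

-- ===== PRECONDITION & SPEC =====
-- Pre_ excludes only the empty outer list, on which Python A raises IndexError (all_lists[0]).
def Pre_lists_non_shared (all_lists : List (List Int)) : Prop := all_lists ≠ []
instance (all_lists : List (List Int)) : Decidable (Pre_lists_non_shared all_lists) := by
  unfold Pre_lists_non_shared; infer_instance

def pvWitness_lists_non_shared : List (List Int) := [[1, 2, 3], [2, 3, 4]]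

def Spec_lists_non_shared (all_lists : List (List Int)) (out : List Int) : Prop := out = lists_non_shared_alt all_lists
instance (all_lists : List (List Int)) (out : List Int) : Decidable (Spec_lists_non_shared all_lists out) := by unfold Spec_lists_non_shared; infer_instance

-- ===== CLAIM (what is proved, stated in full; the proofs are below) =====
def Claim_equal_lists_non_shared : Prop := ∀ (all_lists : List (List Int)), Dom_lists_non_shared all_lists → Pre_lists_non_shared all_lists → Spec_lists_non_shared all_lists (lists_non_shared all_lists)

-- ===== LEMMAS AND PROOFS =====

theorem mem_two_list_intersection (l1 l2 : List Int) (x : Int) :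
    x ∈ two_list_intersection l1 l2 ↔ x ∈ l1 ∧ x ∈ l2 := by
  unfold two_list_intersection
  rw [PySem.List.foldl_append_if_eq_filter]
  simp

theorem lists_intersection_cons (l0 : List Int) (rest : List (List Int)) :
    lists_intersection (l0 :: rest) = rest.foldl two_list_intersection l0 := by
  unfold lists_intersection
  rw [PySem.List.foldl_pyRange_pyGetD' (l0 :: rest) ([] : List Int) two_list_intersection _
        (by norm_num : (0:Int) ≤ 1)]
  simp [PySem.List.pyGetD_zero_cons]

theorem mem_foldl_inter (rest : List (List Int)) (init : List Int) (x : Int) :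
    x ∈ rest.foldl two_list_intersection init ↔ x ∈ init ∧ ∀ l ∈ rest, x ∈ l := by
  induction rest generalizing init with
  | nil => simp
  | cons l ls ih =>
    simp only [List.foldl_cons, ih, mem_two_list_intersection, List.mem_cons]
    constructor
    · rintro ⟨⟨h1, h2⟩, h3⟩
      exact ⟨h1, fun m hm => hm.elim (fun e => e ▸ h2) (h3 m)⟩
    · rintro ⟨h1, h2⟩
      exact ⟨⟨h1, h2 l (Or.inl rfl)⟩, fun m hm => h2 m (Or.inr hm)⟩

theorem count0_getD (cand : List Int) (v : Int) :
    (cand.foldl (fun d x => d.insert x 0) (PySem.Dict.empty : PySem.Dict Int Int)).getD v 0 = 0 := by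
  have key : ∀ d : PySem.Dict Int Int,
      (cand.foldl (fun d x => d.insert x 0) d).getD v 0
        = if v ∈ cand then 0 else d.getD v 0 := by
    intro d
    induction cand generalizing d with
    | nil => simp
    | cons x xs ih =>
      simp only [List.foldl_cons, ih, List.mem_cons]
      by_cases hx : v ∈ xs
      · simp [hx]
      · by_cases hvx : v = x
        · simp [hvx, PySem.Dict.getD_insert_self]
        · simp [hx, hvx, PySem.Dict.getD_insert_of_ne d 0 0 hvx]
  rw [key]
  split <;> simp [PySem.Dict.getD_empty]

theorem count_nodup_eq (l : List Int) (v : Int) (h : l.Nodup) :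
    l.count v = if v ∈ l then 1 else 0 := by
  by_cases hv : v ∈ l
  · simp [hv, List.count_eq_one_of_mem h hv]
  · simp [hv, List.count_eq_zero_of_not_mem hv]

theorem count_step (cand : List Int) (hn : cand.Nodup) (s : PySem.Set Int)
    (c : PySem.Dict Int Int) (v : Int) :
    (cand.foldl (fun c x => if PySem.Set.contains s x then c.modify x 0 (· + 1) else c) c).getD v 0
      = c.getD v 0 + (if v ∈ cand ∧ v ∈ s then 1 else 0) := by
  rw [PySem.List.foldl_if_eq_foldl_filter]
  rw [PySem.Dict.getD_foldl_modify_add_one]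
  rw [count_nodup_eq _ _ (hn.filter _)]
  simp only [List.mem_filter, PySem.Set.contains_iff]
  by_cases h : v ∈ cand ∧ v ∈ s <;> simp [h]

theorem count_total (ls : List (List Int)) (cand : List Int) (hn : cand.Nodup)
    (c : PySem.Dict Int Int) (v : Int) (hv : v ∈ cand) :
    (ls.foldl (fun c one_list =>
        cand.foldl (fun c x => if PySem.Set.contains (PySem.Set.ofList one_list) x then c.modify x 0 (· + 1) else c) c) c).getD v 0
      = c.getD v 0 + (ls.countP (fun l => decide (v ∈ l)) : Int) := by
  induction ls generalizing c with
  | nil => simp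
  | cons l ls ih =>
    simp only [List.foldl_cons, ih, count_step cand hn (PySem.Set.ofList l) c v]
    have : v ∈ PySem.Set.ofList l ↔ v ∈ l := PySem.Set.mem_ofList l v
    by_cases hl : v ∈ l
    · simp [hl, this, hv]
      ring
    · simp [hl, this]

theorem a_inner_loop (c : List Int) (l : List Int) (acc : List Int) :
    l.foldl (fun ret data => if c.contains data then ret else ret ++ [data]) acc
      = acc ++ l.filter (fun x => !(c.contains x)) := by
  induction l generalizing acc with
  | nil => simp
  | cons x xs ih =>
    simp only [List.foldl_cons, List.filter_cons, ih]
    cases hx : c.contains x <;> simp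

theorem a_outer_loop (c : List Int) (ls : List (List Int)) (acc : List Int) :
    ls.foldl (fun ret one_list =>
        one_list.foldl (fun ret data => if c.contains data then ret else ret ++ [data]) ret) acc
      = acc ++ ls.flatMap (fun l => l.filter (fun x => !(c.contains x))) := by
  induction ls generalizing acc with
  | nil => simp
  | cons l ls ih =>
    rw [List.foldl_cons, a_inner_loop, ih, List.flatMap_cons, List.append_assoc]

-- ===== VERDICT (by name: the statement is the Claim_ definition above) =====
theorem lists_non_shared_spec : Claim_equal_lists_non_shared := by
  intro all_lists _ hpre
  unfold Spec_lists_non_shared lists_non_shared lists_non_shared_alt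
  obtain ⟨l0, rest, rfl⟩ : ∃ l0 rest, all_lists = l0 :: rest := by
    cases all_lists with
    | nil => exact absurd rfl hpre
    | cons a b => exact ⟨a, b, rfl⟩
  simp only [PySem.List.pyGetD_zero_cons]
  rw [a_outer_loop, List.nil_append]
  apply List.flatMap_congr
  intro l _
  apply List.filter_congr
  intro x _
  congr 1
  rw [Bool.eq_iff_iff, List.contains_iff_mem, lists_intersection_cons, mem_foldl_inter,
      PySem.Set.contains_iff, List.mem_filter]
  have hnd : (PySem.Set.ofList l0).Nodup := PySem.Set.nodup_ofList l0
  constructor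
  · rintro ⟨h0, hrest⟩
    have hx0 : x ∈ PySem.Set.ofList l0 := (PySem.Set.mem_ofList l0 x).mpr h0
    refine ⟨hx0, ?_⟩
    rw [count_total _ _ hnd _ _ hx0, count0_getD, zero_add, beq_iff_eq, Nat.cast_inj]
    rw [List.countP_eq_length]
    intro m hm
    rcases List.mem_cons.mp hm with h | h
    · exact decide_eq_true (h ▸ h0)
    · exact decide_eq_true (hrest m h)
  · rintro ⟨hx0, hcnt⟩
    have h0 : x ∈ l0 := (PySem.Set.mem_ofList l0 x).mp hx0
    refine ⟨h0, ?_⟩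
    rw [count_total _ _ hnd _ _ hx0, count0_getD, zero_add, beq_iff_eq, Nat.cast_inj,
        List.countP_eq_length] at hcnt
    intro m hm
    exact of_decide_eq_true (hcnt m (List.mem_cons_of_mem _ hm))
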